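-- pv_equiv track=rewrite | github.com/alma29v1/big-beautiful-server | utils/ai_command_controller.py | generate_helpful_response
-- ===== SOURCE A (Python) =====
-- def generate_helpful_response(user_input: str) -> str:
--     """Generate a helpful response for unknown commands"""
--     input_lower = user_input.lower()
--
--     # Check for common patterns and provide helpful responses
--     if any(word in input_lower for word in ['marketing', 'strategy', 'strategies']):
--         return "I can help you with marketing strategies! Try saying 'marketing strategies' to discuss email marketing, AT&T Fiber campaigns, or ADT Security promotions. Or say 'help' to see all available commands."
--
--     if any(word in input_lower for word in ['automation', 'run', 'start', 'execute']):
--         return "I can run automation for you! Try saying 'run automation' to start the complete workflow, or 'help' to see all available automation commands."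
--
--     if any(word in input_lower for word in ['voice', 'speak', 'talk']):
--         return "I can change voices for you! Try saying 'change voice' to switch to a different voice, or 'help' to see all available commands."
--
--     # Default helpful response
--     return f"I understand you said: '{user_input}'. I'm here to help with automation, marketing strategies, and campaign management. Say 'help' to see all available commands, or try asking about 'marketing strategies' or 'run automation'."
-- ===== SOURCE B (Python) =====
-- # Single-pass position scan: at each index of the lowercased input, test which
-- # keywords start there, keeping the best (lowest) category seen; A instead runs
-- # a separate substring search per keyword in branch order.
--
-- KEYWORDS = [
--     ("marketing", 0), ("strategy", 0), ("strategies", 0),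
--     ("automation", 1), ("run", 1), ("start", 1), ("execute", 1),
--     ("voice", 2), ("speak", 2), ("talk", 2),
-- ]
--
-- RESPONSES = [
--     "I can help you with marketing strategies! Try saying 'marketing strategies' to discuss email marketing, AT&T Fiber campaigns, or ADT Security promotions. Or say 'help' to see all available commands.",
--     "I can run automation for you! Try saying 'run automation' to start the complete workflow, or 'help' to see all available automation commands.",
--     "I can change voices for you! Try saying 'change voice' to switch to a different voice, or 'help' to see all available commands.",
-- ]
--
--
-- def generate_helpful_response(user_input: str) -> str:
--     """Generate a helpful response for unknown commands (single-pass scan)."""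
--     s = user_input.lower()
--     best = 3
--     for i in range(len(s)):
--         for word, cat in KEYWORDS:
--             if cat < best and s.startswith(word, i):
--                 best = cat
--     if best < 3:
--         return RESPONSES[best]
--     return f"I understand you said: '{user_input}'. I'm here to help with automation, marketing strategies, and campaign management. Say 'help' to see all available commands, or try asking about 'marketing strategies' or 'run automation'."
-- ===== Notes on version B (the rewrite author's own statement) =====
-- stated objective: alternative
-- what changed: Replaces A's branch-ordered per-keyword substring searches with a single left-to-right scan of the lowercased input that tests all ten keywords as prefixes at each position, keeping the lowest category index in a priority accumulator and indexing a response table at the end.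
import Mathlib
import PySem

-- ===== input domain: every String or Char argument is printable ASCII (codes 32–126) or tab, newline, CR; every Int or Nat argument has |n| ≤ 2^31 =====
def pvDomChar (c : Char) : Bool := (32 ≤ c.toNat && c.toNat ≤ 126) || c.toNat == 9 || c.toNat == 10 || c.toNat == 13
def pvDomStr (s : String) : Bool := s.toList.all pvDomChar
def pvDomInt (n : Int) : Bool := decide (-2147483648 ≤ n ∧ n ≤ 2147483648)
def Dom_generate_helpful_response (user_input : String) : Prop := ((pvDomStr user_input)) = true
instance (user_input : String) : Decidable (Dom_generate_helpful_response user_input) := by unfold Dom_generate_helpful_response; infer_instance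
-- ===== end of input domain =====

-- One-line objective: B replaces A's per-keyword substring searches with a single
-- left-to-right position scan matching all keywords as prefixes with a priority
-- accumulator (alternative algorithm, same values everywhere).

-- ===== PORT A =====
def generate_helpful_response (user_input : String) : String :=
  let input_lower := PySem.Str.lower user_input
  if ["marketing", "strategy", "strategies"].any (fun word => PySem.Str.isIn word input_lower) then
    "I can help you with marketing strategies! Try saying 'marketing strategies' to discuss email marketing, AT&T Fiber campaigns, or ADT Security promotions. Or say 'help' to see all available commands."
  else if ["automation", "run", "start", "execute"].any (fun word => PySem.Str.isIn word input_lower) then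
    "I can run automation for you! Try saying 'run automation' to start the complete workflow, or 'help' to see all available automation commands."
  else if ["voice", "speak", "talk"].any (fun word => PySem.Str.isIn word input_lower) then
    "I can change voices for you! Try saying 'change voice' to switch to a different voice, or 'help' to see all available commands."
  else
    "I understand you said: '" ++ user_input ++ "'. I'm here to help with automation, marketing strategies, and campaign management. Say 'help' to see all available commands, or try asking about 'marketing strategies' or 'run automation'."

-- ===== PORT B =====
def pvKeywords : List (List Char × Nat) :=
  [ ("marketing".toList, 0), ("strategy".toList, 0), ("strategies".toList, 0),
    ("automation".toList, 1), ("run".toList, 1), ("start".toList, 1), ("execute".toList, 1),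
    ("voice".toList, 2), ("speak".toList, 2), ("talk".toList, 2) ]

def pvResponses : List String :=
  [ "I can help you with marketing strategies! Try saying 'marketing strategies' to discuss email marketing, AT&T Fiber campaigns, or ADT Security promotions. Or say 'help' to see all available commands.",
    "I can run automation for you! Try saying 'run automation' to start the complete workflow, or 'help' to see all available automation commands.",
    "I can change voices for you! Try saying 'change voice' to switch to a different voice, or 'help' to see all available commands." ]

-- inner loop of B: 'for word, cat in KEYWORDS: if cat < best and s.startswith(word, i): best = cat'
def pvInner (l : List Char) (best : Nat) (i : Nat) : Nat :=
  pvKeywords.foldl (fun b p => if p.2 < b && PySem.Chars.startswith (l.drop i) p.1 then p.2 else b) best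

def generate_helpful_response_alt (user_input : String) : String :=
  let l := (PySem.Str.lower user_input).toList
  let best := (List.range l.length).foldl (pvInner l) 3
  if best < 3 then
    pvResponses.getD best ""
  else
    "I understand you said: '" ++ user_input ++ "'. I'm here to help with automation, marketing strategies, and campaign management. Say 'help' to see all available commands, or try asking about 'marketing strategies' or 'run automation'."

-- ===== PRECONDITION & SPEC =====
def Spec_generate_helpful_response (user_input : String) (out : String) : Prop := out = generate_helpful_response_alt user_input
instance (user_input : String) (out : String) : Decidable (Spec_generate_helpful_response user_input out) := by unfold Spec_generate_helpful_response; infer_instance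

-- ===== CLAIM (what is proved, stated in full; the proofs are below) =====
def Claim_equal_generate_helpful_response : Prop := ∀ (user_input : String), Dom_generate_helpful_response user_input → Spec_generate_helpful_response user_input (generate_helpful_response user_input)

-- ===== LEMMAS AND PROOFS =====

-- proof-side abbreviations
def pvMk : List (List Char) := [("marketing".toList), ("strategy".toList), ("strategies".toList)]
def pvAk : List (List Char) := [("automation".toList), ("run".toList), ("start".toList), ("execute".toList)]
def pvVk : List (List Char) := [("voice".toList), ("speak".toList), ("talk".toList)]

def pvMatchAt (ws : List (List Char)) (l : List Char) (i : Nat) : Bool :=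
  ws.any (fun w => PySem.Chars.startswith (l.drop i) w)

def pvCatAt (l : List Char) (i : Nat) : Nat :=
  if pvMatchAt pvMk l i then 0 else if pvMatchAt pvAk l i then 1 else
  if pvMatchAt pvVk l i then 2 else 3

-- fold over a same-category group of keywords = one any-test
theorem pv_foldl_group (ws : List (List Char)) (c : Nat) (b : Nat) (t : List Char) :
    (ws.map (fun w => (w, c))).foldl
      (fun b p => if p.2 < b && PySem.Chars.startswith t p.1 then p.2 else b) b
    = if c < b && ws.any (fun w => PySem.Chars.startswith t w) then c else b := by
  induction ws generalizing b with
  | nil => simp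
  | cons w ws ih =>
    simp only [List.map_cons, List.foldl_cons]
    rcases Nat.lt_or_ge c b with h | h
    · cases hw : PySem.Chars.startswith t w with
      | true =>
        rw [if_pos (by simp [h, hw]), ih]
        simp [h, hw]
      | false =>
        rw [if_neg (by simp [hw]), ih]
        simp [h, hw]
    · rw [if_neg (by simp [Nat.not_lt.mpr h]), ih]
      simp [Nat.not_lt.mpr h]

theorem pvInner_min (l : List Char) (i b : Nat) (hb : b ≤ 3) :
    pvInner l b i = min b (pvCatAt l i) := by
  have hsplit : pvKeywords =
      (pvMk.map (fun w => (w, 0))) ++ (pvAk.map (fun w => (w, 1))) ++ (pvVk.map (fun w => (w, 2))) := by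
    decide
  unfold pvInner
  rw [hsplit, List.foldl_append, List.foldl_append, pv_foldl_group, pv_foldl_group, pv_foldl_group]
  unfold pvCatAt pvMatchAt
  by_cases hm : pvMk.any (fun w => PySem.Chars.startswith (l.drop i) w) = true <;>
  by_cases ha : pvAk.any (fun w => PySem.Chars.startswith (l.drop i) w) = true <;>
  by_cases hv : pvVk.any (fun w => PySem.Chars.startswith (l.drop i) w) = true <;>
    simp [hm, ha, hv] <;> first
      | (split_ifs <;> omega)
      | omega

-- B's min-fold over positions
def pvBestFold (l : List Char) (b n : Nat) : Nat :=
  (List.range n).foldl (fun m i => min m (pvCatAt l i)) b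

theorem pvBestFold_le (l : List Char) (b n : Nat) : pvBestFold l b n ≤ b := by
  induction n with
  | zero => simp [pvBestFold]
  | succ n ih =>
    have : pvBestFold l b (n+1) = min (pvBestFold l b n) (pvCatAt l n) := by
      simp [pvBestFold, List.range_succ]
    omega

theorem pv_fold_eq_bestFold (l : List Char) (n : Nat) (b : Nat) (hb : b ≤ 3) :
    (List.range n).foldl (pvInner l) b = pvBestFold l b n := by
  induction n with
  | zero => simp [pvBestFold]
  | succ n ih =>
    have h1 : pvBestFold l b n ≤ 3 := le_trans (pvBestFold_le l b n) hb
    simp only [List.range_succ, List.foldl_append, List.foldl_cons, List.foldl_nil, ih]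
    rw [pvInner_min l n _ h1]
    simp [pvBestFold, List.range_succ]

def pvMU (ws : List (List Char)) (l : List Char) (n : Nat) : Bool :=
  (List.range n).any (fun i => pvMatchAt ws l i)

theorem pvBestFold_eq (l : List Char) (n : Nat) :
    pvBestFold l 3 n =
      if pvMU pvMk l n then 0 else if pvMU pvAk l n then 1 else
      if pvMU pvVk l n then 2 else 3 := by
  induction n with
  | zero => simp [pvBestFold, pvMU]
  | succ n ih =>
    have hf : pvBestFold l 3 (n+1) = min (pvBestFold l 3 n) (pvCatAt l n) := by
      simp [pvBestFold, List.range_succ]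
    have hmu : ∀ ws, pvMU ws l (n+1) = (pvMU ws l n || pvMatchAt ws l n) := by
      intro ws; simp [pvMU, List.range_succ]
    rw [hf, ih, hmu, hmu, hmu]
    unfold pvCatAt
    by_cases h1 : pvMU pvMk l n = true <;> by_cases h2 : pvMU pvAk l n = true <;>
    by_cases h3 : pvMU pvVk l n = true <;>
    by_cases g1 : pvMatchAt pvMk l n = true <;> by_cases g2 : pvMatchAt pvAk l n = true <;>
    by_cases g3 : pvMatchAt pvVk l n = true <;>
      simp [h1, h2, h3, g1, g2, g3]

-- bounded position scan = Python substring membership, for nonempty keywords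
theorem pvMU_eq_isIn (ws : List (List Char)) (hws : ∀ w ∈ ws, w ≠ []) (l : List Char) :
    pvMU ws l l.length = ws.any (fun w => PySem.Chars.isIn w l) := by
  rw [Bool.eq_iff_iff]
  simp only [pvMU, pvMatchAt, List.any_eq_true, List.mem_range]
  constructor
  · rintro ⟨i, hi, w, hw, hsw⟩
    refine ⟨w, hw, ?_⟩
    rw [← PySem.Chars.exists_prefix_drop_iff_isIn]
    exact ⟨i, (PySem.Chars.startswith_iff _ _).mp hsw⟩
  · rintro ⟨w, hw, hin⟩
    obtain ⟨j, hj⟩ := (PySem.Chars.exists_prefix_drop_iff_isIn w l).mpr hin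
    by_cases hlt : j < l.length
    · exact ⟨j, hlt, w, hw, (PySem.Chars.startswith_iff _ _).mpr hj⟩
    · exfalso
      have : l.drop j = [] := List.drop_eq_nil_of_le (le_of_not_gt hlt)
      rw [this] at hj
      exact hws w hw (List.prefix_nil.mp hj)

-- ===== VERDICT (by name: the statement is the Claim_ definition above) =====
set_option maxHeartbeats 1000000 in
theorem generate_helpful_response_spec : Claim_equal_generate_helpful_response := by
  intro user_input _
  unfold Spec_generate_helpful_response generate_helpful_response generate_helpful_response_alt
  set l := (PySem.Str.lower user_input).toList with hl
  have hbest : (List.range l.length).foldl (pvInner l) 3 =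
      if pvMU pvMk l l.length then 0 else if pvMU pvAk l l.length then 1 else
      if pvMU pvVk l l.length then 2 else 3 := by
    rw [pv_fold_eq_bestFold l l.length 3 (by omega), pvBestFold_eq]
  have hMA : (["marketing", "strategy", "strategies"].any
      (fun word => PySem.Str.isIn word (PySem.Str.lower user_input))) = pvMU pvMk l l.length := by
    rw [pvMU_eq_isIn _ (by decide) l]; simp [pvMk, hl]
  have hAA : (["automation", "run", "start", "execute"].any
      (fun word => PySem.Str.isIn word (PySem.Str.lower user_input))) = pvMU pvAk l l.length := by
    rw [pvMU_eq_isIn _ (by decide) l]; simp [pvAk, hl]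
  have hVA : (["voice", "speak", "talk"].any
      (fun word => PySem.Str.isIn word (PySem.Str.lower user_input))) = pvMU pvVk l l.length := by
    rw [pvMU_eq_isIn _ (by decide) l]; simp [pvVk, hl]
  simp only [hbest, hMA, hAA, hVA]
  cases pvMU pvMk l l.length <;> cases pvMU pvAk l l.length <;> cases pvMU pvVk l l.length <;>
    simp [pvResponses]
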